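-- pv_equiv track=rewrite | github.com/erencivril/lol-draft-assistant | backend/app/providers/lolalytics_provider.py | _parse_base36_ref
-- ===== SOURCE A (Python) =====
-- def _parse_base36_ref(value: str) -> int | None:
--     digits: list[str] = []
--     for char in value.lower():
--         if char.isdigit() or "a" <= char <= "z":
--             digits.append(char)
--             continue
--         break
--     if not digits:
--         return None
--     return int("".join(digits), 36)
-- ===== SOURCE B (Python) =====
-- def _parse_base36_ref(value: str) -> int | None:
--     acc = 0
--     found = False
--     for char in value.lower():
--         if char.isdigit() or "a" <= char <= "z":
--             acc = acc * 36 + int(char, 36)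
--             found = True
--             continue
--         break
--     return acc if found else None
-- ===== Notes on version B (the rewrite author's own statement) =====
-- stated objective: simpler
-- what changed: Replaces the collect-chars-into-a-list + join + int(.,36) two-phase parse with a single-pass Horner accumulator (acc = acc*36 + digit) and a found flag, allocating no intermediate list or string.
import Mathlib
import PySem

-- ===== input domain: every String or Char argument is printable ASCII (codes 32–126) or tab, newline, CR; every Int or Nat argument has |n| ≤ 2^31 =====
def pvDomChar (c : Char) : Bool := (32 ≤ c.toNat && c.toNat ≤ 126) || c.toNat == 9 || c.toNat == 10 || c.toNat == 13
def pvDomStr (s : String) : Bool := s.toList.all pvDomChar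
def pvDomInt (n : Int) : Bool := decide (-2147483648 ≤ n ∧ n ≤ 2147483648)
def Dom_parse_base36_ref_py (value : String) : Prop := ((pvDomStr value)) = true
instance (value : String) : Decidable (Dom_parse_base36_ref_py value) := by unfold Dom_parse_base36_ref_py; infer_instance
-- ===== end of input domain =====

-- B replaces A's collect-list + join + int(.,36) two-phase parse with a one-pass Horner
-- accumulator and a found flag (objective: simpler; same exact behaviour on the ASCII domain).

-- ===== PORT A =====
-- guard `char.isdigit() or "a" <= char <= "z"`; Char.isDigit = '0'..'9', exact on the ASCII domain
def pvGuard (c : Char) : Bool := c.isDigit || ('a' ≤ c && c ≤ 'z')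

-- base-36 value of one accepted char (hand port, exact for '0'-'9' and 'a'-'z')
def pvDig36 (c : Char) : Int := if c.isDigit then (c.toNat : Int) - 48 else (c.toNat : Int) - 97 + 10

-- the for-loop with break: collect leading accepted chars into `digits`
def pvCollectA : List Char → List Char
  | [] => []
  | c :: rest => if pvGuard c then c :: pvCollectA rest else []

-- hand port of int("".join(digits), 36), exact on the collected digit chars
def pvInt36 (ds : List Char) : Int := ds.foldl (fun a c => a * 36 + pvDig36 c) 0

def parse_base36_ref_py (value : String) : Option Int :=
  let digits := pvCollectA (PySem.Chars.lower value.toList)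
  if digits.isEmpty then none else some (pvInt36 digits)

-- ===== PORT B =====
-- single pass: Horner accumulator + found flag, break ends the scan
def pvScanB (acc : Int) (found : Bool) : List Char → Option Int
  | [] => if found then some acc else none
  | c :: rest =>
    if pvGuard c then pvScanB (acc * 36 + pvDig36 c) true rest
    else if found then some acc else none

def parse_base36_ref_py_alt (value : String) : Option Int :=
  pvScanB 0 false (PySem.Chars.lower value.toList)

-- ===== PRECONDITION & SPEC =====
def Spec_parse_base36_ref_py (value : String) (out : Option Int) : Prop := out = parse_base36_ref_py_alt value
instance (value : String) (out : Option Int) : Decidable (Spec_parse_base36_ref_py value out) := by unfold Spec_parse_base36_ref_py; infer_instance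

-- ===== CLAIM (what is proved, stated in full; the proofs are below) =====
def Claim_equal_parse_base36_ref_py : Prop := ∀ (value : String), Dom_parse_base36_ref_py value → Spec_parse_base36_ref_py value (parse_base36_ref_py value)

-- ===== LEMMAS AND PROOFS =====
-- the fused scan equals collect-then-fold, for any accumulator state
theorem pvScanB_eq_collect (l : List Char) : ∀ (acc : Int) (found : Bool),
    pvScanB acc found l =
      if (pvCollectA l).isEmpty then (if found then some acc else none)
      else some ((pvCollectA l).foldl (fun a c => a * 36 + pvDig36 c) acc) := by
  induction l with
  | nil => intro acc found; simp [pvScanB, pvCollectA]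
  | cons c rest ih =>
    intro acc found
    by_cases h : pvGuard c = true
    · rcases h2 : pvCollectA rest with _ | ⟨d, ds⟩ <;>
        simp [pvScanB, pvCollectA, h, ih, h2]
    · simp [pvScanB, pvCollectA, h]

-- ===== VERDICT (by name: the statement is the Claim_ definition above) =====
theorem parse_base36_ref_py_spec : Claim_equal_parse_base36_ref_py := by
  intro value _
  unfold Spec_parse_base36_ref_py parse_base36_ref_py parse_base36_ref_py_alt
  rw [pvScanB_eq_collect]
  by_cases h : (pvCollectA (PySem.Chars.lower value.toList)).isEmpty <;> simp [h, pvInt36]
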